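-- pv_equiv track=rewrite | github.com/silvuple/w3resource.com-python-exercises | collections.py | check_break_list
-- ===== SOURCE A (Python) =====
-- import collections as clt
--
-- def check_break_list(nums, n):
--     coll_data = clt.Counter(nums)
--     for x in sorted(coll_data.keys()):
--         for index in range(1, n):
--             coll_data[x+index] = coll_data[x+index]  - coll_data[x]
--             if coll_data[x+index] < 0:
--                 return False
--     return True
-- ===== SOURCE B (Python) =====
-- import collections as clt
--
-- def check_break_list(nums, n):
--     # Greedy over the sorted distinct values, keeping a deque of the still-open
--     # consecutive groups (start value, how many groups started there).
--     if n <= 1: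
--         return True
--     cnt = clt.Counter(nums)
--     open_ = clt.deque()   # open groups, oldest first
--     opened = 0            # total number of open groups
--     prev = None
--     for v in sorted(cnt):
--         if opened and v != prev + 1:
--             return False          # open groups cannot be continued across a gap
--         r = cnt[v] - opened       # groups that must newly start at v
--         if r < 0:
--             return False
--         if r:
--             open_.append((v, r))
--             opened += r
--         while open_ and open_[0][0] + n - 1 <= v:
--             opened -= open_[0][1]   # these groups are complete
--             open_.popleft()
--         prev = v
--     return opened == 0
-- ===== Notes on version B (the rewrite author's own statement) =====
-- stated objective: alternative
-- what changed: Replaces A's per-value inner loop that decrements the next n-1 counter entries with a single greedy pass over the sorted distinct values that keeps a deque of still-open consecutive groups and a running total of open groups.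
import Mathlib
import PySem

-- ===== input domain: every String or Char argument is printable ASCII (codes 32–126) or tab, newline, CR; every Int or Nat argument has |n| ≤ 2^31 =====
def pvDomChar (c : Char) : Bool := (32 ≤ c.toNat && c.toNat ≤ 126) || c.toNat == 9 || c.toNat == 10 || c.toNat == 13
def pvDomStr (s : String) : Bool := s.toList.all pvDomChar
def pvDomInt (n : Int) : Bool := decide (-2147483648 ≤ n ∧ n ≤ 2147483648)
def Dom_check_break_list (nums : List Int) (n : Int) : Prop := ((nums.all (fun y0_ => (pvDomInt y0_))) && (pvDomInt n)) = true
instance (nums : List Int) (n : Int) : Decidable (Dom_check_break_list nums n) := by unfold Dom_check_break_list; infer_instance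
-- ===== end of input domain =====

-- B replaces A's per-value inner loop (which decrements the next n-1 counter entries) by a
-- single greedy pass over the sorted distinct values with a deque of still-open consecutive
-- groups; same return value on every input.

-- ===== PORT A =====
-- inner 'for index in range(1, n)' loop; 'none' = the early 'return False'
def aInner (x : Int) (d : PySem.Dict Int Int) : List Int → Option (PySem.Dict Int Int)
  | [] => some d
  | i :: rest =>
      let v := d.getD (x + i) 0 - d.getD x 0
      let d' := d.insert (x + i) v
      if v < 0 then none else aInner x d' rest

-- outer 'for x in sorted(coll_data.keys())' loop
def aOuter (n : Int) (d : PySem.Dict Int Int) : List Int → Bool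
  | [] => true
  | x :: rest =>
      match aInner x d (PySem.List.pyRange 1 n 1) with
      | none => false
      | some d' => aOuter n d' rest

def check_break_list (nums : List Int) (n : Int) : Bool :=
  let d := PySem.Dict.counter nums
  aOuter n d (PySem.List.sorted d.keys (fun x => x) false)

-- ===== PORT B =====
-- 'while open_ and open_[0][0] + n - 1 <= v: opened -= open_[0][1]; open_.popleft()'
def bPrune (n : Int) (v : Int) : List (Int × Int) → Int → (List (Int × Int)) × Int
  | [], opened => ([], opened)
  | (u, r) :: rest, opened =>
      if u + n - 1 ≤ v then bPrune n v rest (opened - r)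
      else ((u, r) :: rest, opened)

-- 'for v in sorted(cnt)' loop of Source B; 'prev' is not None whenever opened ≠ 0, so the
-- short-circuited Python test 'opened and v != prev + 1' reads prev only in the 'some' arm
def bLoop (cnt : PySem.Dict Int Int) (n : Int) : List Int → List (Int × Int) → Int → Option Int → Bool
  | [], _, opened, _ => decide (opened = 0)
  | v :: vs, open_, opened, prev =>
      if (opened ≠ 0) ∧ (∀ p, prev = some p → v ≠ p + 1) then false
      else
        let r := cnt.getD v 0 - opened
        if r < 0 then false
        else
          let st1 := if r ≠ 0 then (open_ ++ [(v, r)], opened + r) else (open_, opened)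
          let st2 := bPrune n v st1.1 st1.2
          bLoop cnt n vs st2.1 st2.2 (some v)

def check_break_list_alt (nums : List Int) (n : Int) : Bool :=
  if n ≤ 1 then true
  else
    let cnt := PySem.Dict.counter nums
    bLoop cnt n (PySem.List.sorted cnt.keys (fun x => x) false) [] 0 none

-- ===== PRECONDITION & SPEC =====
def Spec_check_break_list (nums : List Int) (n : Int) (out : Bool) : Prop := out = check_break_list_alt nums n
instance (nums : List Int) (n : Int) (out : Bool) : Decidable (Spec_check_break_list nums n out) := by unfold Spec_check_break_list; infer_instance

-- ===== CLAIM (what is proved, stated in full; the proofs are below) =====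
def Claim_equal_check_break_list : Prop := ∀ (nums : List Int) (n : Int), Dom_check_break_list nums n → Spec_check_break_list nums n (check_break_list nums n)

-- ===== LEMMAS AND PROOFS =====

-- window sum: total r of the recorded values u with 0 < w - u < n
def pvWsum (n : Int) (recent : List (Int × Int)) (w : Int) : Int :=
  ((recent.filter (fun q => decide (0 < w - q.1) && decide (w - q.1 < n))).map (fun q => q.2)).sum

-- remaining count at w after all recorded groups passed through it
def pvAval (nums : List Int) (n : Int) (recent : List (Int × Int)) (w : Int) : Int :=
  (nums.count w : Int) - pvWsum n recent w

-- the (value, groups newly started there) pairs produced by the greedy run, newest first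
def pvRseq (nums : List Int) (n : Int) : List (Int × Int) → List Int → List (Int × Int)
  | recent, [] => recent
  | recent, x :: ks => pvRseq nums n ((x, pvAval nums n recent x) :: recent) ks

def pvShadow (n : Int) (ks : List Int) (w : Int) : Prop := ∃ x ∈ ks, 0 < w - x ∧ w - x < n

theorem pvWsum_nil (n w : Int) : pvWsum n [] w = 0 := rfl

theorem pvWsum_cons (n : Int) (u r w : Int) (rec : List (Int × Int)) :
    pvWsum n ((u, r) :: rec) w = (if 0 < w - u ∧ w - u < n then r else 0) + pvWsum n rec w := by
  simp [pvWsum, List.filter_cons]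
  split_ifs <;> simp_all

theorem pvAval_cons (nums : List Int) (n u r w : Int) (rec : List (Int × Int)) :
    pvAval nums n ((u, r) :: rec) w
      = pvAval nums n rec w - (if 0 < w - u ∧ w - u < n then r else 0) := by
  simp [pvAval, pvWsum_cons]; ring

-- value recorded at a processed key = final remaining count there
theorem pvRseq_aval_head (nums : List Int) (n : Int) (ks : List Int) (rec : List (Int × Int)) (x : Int)
    (hs : ks.Pairwise (· < ·)) (hgt : ∀ u ∈ ks, x < u) (hlt : ∀ q ∈ rec, ∀ u ∈ ks, q.1 < u) :
    pvAval nums n (pvRseq nums n rec ks) x = pvAval nums n rec x := by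
  induction ks generalizing rec with
  | nil => simp [pvRseq]
  | cons u ks ih =>
      have hxu : x < u := hgt u List.mem_cons_self
      have hs' : ks.Pairwise (· < ·) := (List.pairwise_cons.mp hs).2
      have hgt' : ∀ y ∈ ks, x < y := fun y hy => hgt y (List.mem_cons_of_mem _ hy)
      have hlt' : ∀ q ∈ ((u, pvAval nums n rec u) :: rec), ∀ y ∈ ks, q.1 < y := by
        intro q hq y hy
        rcases List.mem_cons.mp hq with h | h
        · subst h; exact (List.pairwise_cons.mp hs).1 y hy
        · exact hlt q h y (List.mem_cons_of_mem _ hy)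
      have hdef : pvRseq nums n rec (u :: ks) = pvRseq nums n ((u, pvAval nums n rec u) :: rec) ks := rfl
      rw [hdef, ih ((u, pvAval nums n rec u) :: rec) hs' hgt' hlt']
      rw [pvAval_cons]
      have : ¬ (0 < x - u ∧ x - u < n) := by
        intro h; omega
      rw [if_neg this]
      ring

-- structure of the greedy run: new window-sum contributions are the in-window keys' values
theorem pvRseq_wsum (nums : List Int) (n : Int) :
    ∀ (ks : List Int) (rec : List (Int × Int)) (w : Int),
      ks.Pairwise (· < ·) → (∀ q ∈ rec, ∀ x ∈ ks, q.1 < x) →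
      pvWsum n (pvRseq nums n rec ks) w
        = pvWsum n rec w
          + ((ks.filter (fun u => decide (0 < w - u) && decide (w - u < n))).map
              (fun u => pvAval nums n (pvRseq nums n rec ks) u)).sum := by
  intro ks
  induction ks with
  | nil => intro rec w _ _; simp [pvRseq]
  | cons x ks ih =>
      intro rec w hs hlt
      have hxks : ∀ u ∈ ks, x < u := by
        intro u hu; exact (List.pairwise_cons.mp hs).1 u hu
      have hs' : ks.Pairwise (· < ·) := (List.pairwise_cons.mp hs).2
      have hlt' : ∀ q ∈ ((x, pvAval nums n rec x) :: rec), ∀ u ∈ ks, q.1 < u := by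
        intro q hq u hu
        rcases List.mem_cons.mp hq with h | h
        · subst h; exact hxks u hu
        · exact hlt q h u (List.mem_cons_of_mem _ hu)
      have hdef : pvRseq nums n rec (x :: ks) = pvRseq nums n ((x, pvAval nums n rec x) :: rec) ks := rfl
      rw [hdef, ih ((x, pvAval nums n rec x) :: rec) w hs' hlt']
      have hx : pvAval nums n (pvRseq nums n ((x, pvAval nums n rec x) :: rec) ks) x
          = pvAval nums n rec x := by
        have := pvRseq_aval_head nums n ks ((x, pvAval nums n rec x) :: rec) x hs' hxks hlt'
        rw [this, pvAval_cons]
        simp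
      rw [pvWsum_cons, List.filter_cons]
      by_cases hw : 0 < w - x ∧ w - x < n
      · have hc : (decide (0 < w - x) && decide (w - x < n)) = true := by
          simp only [Bool.and_eq_true, decide_eq_true_eq]; omega
        rw [if_pos hw, if_pos hc]
        simp only [List.map_cons, List.sum_cons]
        rw [hx]
        ring
      · have hc : ¬ ((decide (0 < w - x) && decide (w - x < n)) = true) := by
          simp only [Bool.and_eq_true, decide_eq_true_eq]; omega
        rw [if_neg hw, if_neg hc]
        ring

-- ===== A side =====

theorem aInner_spec (x : Int) :
    ∀ (l : List Int) (d : PySem.Dict Int Int), l.Nodup → (∀ i ∈ l, 0 < i) →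
      ((aInner x d l = none ↔ ∃ i ∈ l, d.getD (x + i) 0 - d.getD x 0 < 0) ∧
       (∀ d', aInner x d l = some d' →
          ∀ w, d'.getD w 0 = d.getD w 0 - (if (w - x) ∈ l then d.getD x 0 else 0))) := by
  intro l
  induction l with
  | nil =>
      intro d _ _
      constructor
      · simp [aInner]
      · intro d' hd' w
        simp [aInner] at hd'
        simp [hd']
  | cons i l ih =>
      intro d hnd hpos
      have hi : 0 < i := hpos i List.mem_cons_self
      have hil : i ∉ l := (List.nodup_cons.mp hnd).1
      have hnd' : l.Nodup := (List.nodup_cons.mp hnd).2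
      have hpos' : ∀ j ∈ l, 0 < j := fun j hj => hpos j (List.mem_cons_of_mem _ hj)
      set v := d.getD (x + i) 0 - d.getD x 0 with hv
      set d1 := d.insert (x + i) v with hd1
      have hgd1 : ∀ w, d1.getD w 0 = if w = x + i then v else d.getD w 0 := by
        intro w; rw [hd1, PySem.Dict.getD_insert]
      have hgx : d1.getD x 0 = d.getD x 0 := by
        rw [hgd1]; rw [if_neg (by omega)]
      have hgj : ∀ j ∈ l, d1.getD (x + j) 0 = d.getD (x + j) 0 := by
        intro j hj
        rw [hgd1]
        have hne : x + j ≠ x + i := by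
          intro h
          have hji : j = i := by omega
          exact hil (hji ▸ hj)
        rw [if_neg hne]
      have hstep : aInner x d (i :: l) = if v < 0 then none else aInner x d1 l := rfl
      by_cases hvneg : v < 0
      · rw [hstep, if_pos hvneg]
        constructor
        · constructor
          · intro _; exact ⟨i, List.mem_cons_self, hvneg⟩
          · intro _; rfl
        · intro d' hd'; exact absurd hd' (by simp)
      · rw [hstep, if_neg hvneg]
        obtain ⟨ihn, ihs⟩ := ih d1 hnd' hpos'
        constructor
        · rw [ihn]
          constructor
          · rintro ⟨j, hj, hjlt⟩
            refine ⟨j, List.mem_cons_of_mem _ hj, ?_⟩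
            rw [hgj j hj, hgx] at hjlt; exact hjlt
          · rintro ⟨j, hj, hjlt⟩
            rcases List.mem_cons.mp hj with h | h
            · subst h; exact absurd hjlt hvneg
            · exact ⟨j, h, by rw [hgj j h, hgx]; exact hjlt⟩
        · intro d' hd' w
          have := ihs d' hd' w
          rw [this, hgx, hgd1 w]
          by_cases hw : w = x + i
          · have h1 : (w - x) ∈ (i :: l) := by rw [hw]; simp
            have h2 : (w - x) ∉ l := by
              rw [hw]; simpa using hil
            rw [if_pos hw, if_pos h1, if_neg h2]
            rw [hv, hw]; ring
          · have h3 : ((w - x) ∈ (i :: l)) ↔ ((w - x) ∈ l) := by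
              constructor
              · intro h; rcases List.mem_cons.mp h with h | h
                · exact absurd (by omega : w = x + i) hw
                · exact h
              · exact List.mem_cons_of_mem _
            rw [if_neg hw]
            by_cases h4 : (w - x) ∈ l
            · rw [if_pos h4, if_pos (h3.mpr h4)]
            · rw [if_neg h4, if_neg (fun hc => h4 (h3.mp hc))]

theorem aOuter_spec (nums : List Int) (n : Int) :
    ∀ (ks : List Int) (rec : List (Int × Int)) (d : PySem.Dict Int Int),
      ks.Pairwise (· < ·) → (∀ q ∈ rec, ∀ x ∈ ks, q.1 < x) →
      (∀ w, d.getD w 0 = pvAval nums n rec w) →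
      (aOuter n d ks = true ↔
        ∀ w, pvShadow n ks w → 0 ≤ pvAval nums n (pvRseq nums n rec ks) w) := by
  intro ks
  induction ks with
  | nil =>
      intro rec d _ _ _
      simp [aOuter, pvShadow, pvRseq]
  | cons x ks ih =>
      intro rec d hs hlt hd
      have hxks : ∀ u ∈ ks, x < u := (List.pairwise_cons.mp hs).1
      have hs' : ks.Pairwise (· < ·) := (List.pairwise_cons.mp hs).2
      have hlt' : ∀ q ∈ ((x, pvAval nums n rec x) :: rec), ∀ u ∈ ks, q.1 < u := by
        intro q hq u hu
        rcases List.mem_cons.mp hq with h | h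
        · subst h; exact hxks u hu
        · exact hlt q h u (List.mem_cons_of_mem _ hu)
      have hdx : d.getD x 0 = pvAval nums n rec x := hd x
      have hF : pvRseq nums n rec (x :: ks) = pvRseq nums n ((x, pvAval nums n rec x) :: rec) ks := rfl
      have hrng : ∀ i ∈ PySem.List.pyRange 1 n 1, 0 < i := by
        intro i hi
        have := PySem.List.mem_pyRange_one.mp hi
        omega
      obtain ⟨hin, hins⟩ := aInner_spec x (PySem.List.pyRange 1 n 1) d
        (PySem.List.nodup_pyRange_one 1 n) hrng
      have havcons : ∀ w, pvAval nums n ((x, pvAval nums n rec x) :: rec) w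
          = pvAval nums n rec w - (if 0 < w - x ∧ w - x < n then pvAval nums n rec x else 0) :=
        fun w => pvAval_cons nums n x (pvAval nums n rec x) w rec
      have hfail_iff : (aInner x d (PySem.List.pyRange 1 n 1) = none)
          ↔ ∃ w, (0 < w - x ∧ w - x < n) ∧ pvAval nums n ((x, pvAval nums n rec x) :: rec) w < 0 := by
        rw [hin]
        constructor
        · rintro ⟨i, hi, hlt0⟩
          have hmem := PySem.List.mem_pyRange_one.mp hi
          refine ⟨x + i, ⟨by omega, by omega⟩, ?_⟩
          rw [hd (x + i), hdx] at hlt0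
          rw [havcons (x + i)]
          rw [if_pos (by constructor <;> omega)]
          omega
        · rintro ⟨w, hw, hneg⟩
          refine ⟨w - x, PySem.List.mem_pyRange_one.mpr ⟨by omega, by omega⟩, ?_⟩
          have hxw : x + (w - x) = w := by ring
          rw [hxw, hd w, hdx]
          rw [havcons w, if_pos hw] at hneg
          omega
      have houter : aOuter n d (x :: ks)
          = match aInner x d (PySem.List.pyRange 1 n 1) with
            | none => false
            | some d' => aOuter n d' ks := rfl
      cases hres : aInner x d (PySem.List.pyRange 1 n 1) with
      | none =>
          rw [houter, hres]
          simp only [Bool.false_eq_true, false_iff]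
          intro hRHS
          obtain ⟨w, hw, hneg⟩ := hfail_iff.mp hres
          -- window-sum decomposition at w
          have hws := pvRseq_wsum nums n ks ((x, pvAval nums n rec x) :: rec) w hs' hlt'
          have hsum_nonneg : 0 ≤ ((ks.filter (fun u => decide (0 < w - u) && decide (w - u < n))).map
              (fun u => pvAval nums n (pvRseq nums n ((x, pvAval nums n rec x) :: rec) ks) u)).sum := by
            apply List.sum_nonneg
            intro a ha
            obtain ⟨u, hu, hua⟩ := List.mem_map.mp ha
            have humem := List.mem_of_mem_filter hu
            have hcond := (List.mem_filter.mp hu).2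
            simp only [Bool.and_eq_true, decide_eq_true_eq] at hcond
            have hxu : x < u := hxks u humem
            have hsh : pvShadow n (x :: ks) u := ⟨x, List.mem_cons_self, by omega, by omega⟩
            rw [← hua]
            exact hRHS u hsh
          have hvw := hRHS w ⟨x, List.mem_cons_self, hw.1, hw.2⟩
          rw [hF] at hvw
          have : pvAval nums n (pvRseq nums n ((x, pvAval nums n rec x) :: rec) ks) w
              = pvAval nums n ((x, pvAval nums n rec x) :: rec) w
                - ((ks.filter (fun u => decide (0 < w - u) && decide (w - u < n))).map
                    (fun u => pvAval nums n (pvRseq nums n ((x, pvAval nums n rec x) :: rec) ks) u)).sum := by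
            simp only [pvAval] at *
            omega
          omega
      | some d' =>
          rw [houter, hres]
          have hd' : ∀ w, d'.getD w 0 = pvAval nums n ((x, pvAval nums n rec x) :: rec) w := by
            intro w
            rw [hins d' hres w, hd w, hdx, havcons w]
            by_cases hc : (w - x) ∈ PySem.List.pyRange 1 n 1
            · have := PySem.List.mem_pyRange_one.mp hc
              rw [if_pos hc, if_pos (by constructor <;> omega)]
            · have hnotc : ¬ (0 < w - x ∧ w - x < n) := by
                intro hcc
                exact hc (PySem.List.mem_pyRange_one.mpr ⟨by omega, by omega⟩)
              rw [if_neg hc, if_neg hnotc]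
          rw [hF]
          rw [ih ((x, pvAval nums n rec x) :: rec) d' hs' hlt' hd']
          have hnofail : ∀ i ∈ PySem.List.pyRange 1 n 1, ¬ (d.getD (x + i) 0 - d.getD x 0 < 0) := by
            intro i hi hneg
            have : aInner x d (PySem.List.pyRange 1 n 1) = none := hin.mpr ⟨i, hi, hneg⟩
            rw [this] at hres; cases hres
          constructor
          · intro hR w hsh
            by_cases hks : pvShadow n ks w
            · exact hR w hks
            · obtain ⟨u, hu, hu1, hu2⟩ := hsh
              rcases List.mem_cons.mp hu with h | h
              · rw [h] at hu1 hu2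
                -- w is a shadow of x only; no ks key lies in its window
                have hfilnil : ks.filter (fun u => decide (0 < w - u) && decide (w - u < n)) = [] := by
                  rw [List.filter_eq_nil_iff]
                  intro a ha hcond
                  simp only [Bool.and_eq_true, decide_eq_true_eq] at hcond
                  exact hks ⟨a, ha, hcond.1, hcond.2⟩
                have hws := pvRseq_wsum nums n ks ((x, pvAval nums n rec x) :: rec) w hs' hlt'
                rw [hfilnil] at hws
                simp only [List.map_nil, List.sum_nil, add_zero] at hws
                have hge : 0 ≤ pvAval nums n ((x, pvAval nums n rec x) :: rec) w := by
                  have hi : (w - x) ∈ PySem.List.pyRange 1 n 1 :=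
                    PySem.List.mem_pyRange_one.mpr ⟨by omega, by omega⟩
                  have := hnofail (w - x) hi
                  have hxw : x + (w - x) = w := by ring
                  rw [hxw, hd w, hdx] at this
                  rw [havcons w, if_pos (by constructor <;> omega)]
                  omega
                simp only [pvAval] at *
                omega
              · exact absurd ⟨u, h, hu1, hu2⟩ hks
          · intro hR w hks
            obtain ⟨u, hu, hu1, hu2⟩ := hks
            exact hR w ⟨u, List.mem_cons_of_mem _ hu, hu1, hu2⟩

-- ===== B side =====

theorem bPrune_fst (n v : Int) :
    ∀ (l : List (Int × Int)) (s : Int), l.Pairwise (fun a b => a.1 < b.1) →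
      (bPrune n v l s).1 = l.filter (fun q => decide (v < q.1 + n - 1)) := by
  intro l
  induction l with
  | nil => intro s _; rfl
  | cons q l ih =>
      intro s hp
      obtain ⟨u, r⟩ := q
      have hp' : l.Pairwise (fun a b => a.1 < b.1) := (List.pairwise_cons.mp hp).2
      by_cases hdead : u + n - 1 ≤ v
      · have : bPrune n v ((u, r) :: l) s = bPrune n v l (s - r) := by
          simp [bPrune, hdead]
        rw [this, ih (s - r) hp', List.filter_cons]
        rw [if_neg (by simp; omega)]
      · have hstep : (bPrune n v ((u, r) :: l) s).1 = (u, r) :: l := by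
          simp [bPrune, hdead]
        rw [hstep, List.filter_cons, if_pos (by simp; omega)]
        congr 1
        symm
        rw [List.filter_eq_self]
        intro q hq
        have := (List.pairwise_cons.mp hp).1 q hq
        simp
        omega

theorem bPrune_snd (n v : Int) :
    ∀ (l : List (Int × Int)) (s : Int), l.Pairwise (fun a b => a.1 < b.1) →
      (bPrune n v l s).2 = s - ((l.filter (fun q => decide (q.1 + n - 1 ≤ v))).map (fun q => q.2)).sum := by
  intro l
  induction l with
  | nil => intro s _; simp [bPrune]
  | cons q l ih =>
      intro s hp
      obtain ⟨u, r⟩ := q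
      have hp' : l.Pairwise (fun a b => a.1 < b.1) := (List.pairwise_cons.mp hp).2
      by_cases hdead : u + n - 1 ≤ v
      · have : bPrune n v ((u, r) :: l) s = bPrune n v l (s - r) := by
          simp [bPrune, hdead]
        rw [this, ih (s - r) hp', List.filter_cons, if_pos (by simp; omega)]
        simp only [List.map_cons, List.sum_cons]
        ring
      · have hstep : (bPrune n v ((u, r) :: l) s).2 = s := by
          simp [bPrune, hdead]
        rw [hstep, List.filter_cons, if_neg (by simp; omega)]
        have hnil : l.filter (fun q => decide (q.1 + n - 1 ≤ v)) = [] := by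
          rw [List.filter_eq_nil_iff]
          intro q hq
          have := (List.pairwise_cons.mp hp).1 q hq
          simp
          omega
        rw [hnil]
        simp

-- zeros drop out of a window sum
theorem pvSum_filter_pos (rec : List (Int × Int)) (P : Int × Int → Bool)
    (h : ∀ q ∈ rec, 0 ≤ q.2) :
    ((rec.filter (fun q => decide (0 < q.2) && P q)).map (fun q => q.2)).sum
      = ((rec.filter P).map (fun q => q.2)).sum := by
  induction rec with
  | nil => rfl
  | cons q l ih =>
      have h' : ∀ q ∈ l, 0 ≤ q.2 := fun q hq => h q (List.mem_cons_of_mem _ hq)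
      have hq0 : 0 ≤ q.2 := h q List.mem_cons_self
      rw [List.filter_cons, List.filter_cons]
      by_cases hP : P q = true
      · by_cases hpos : 0 < q.2
        · rw [if_pos (by simp [hP, hpos]), if_pos hP]
          simp only [List.map_cons, List.sum_cons]
          rw [ih h']
        · have hz : q.2 = 0 := by omega
          rw [if_neg (by simp [hpos]), if_pos hP]
          simp only [List.map_cons, List.sum_cons]
          rw [ih h', hz]
          ring
      · rw [if_neg (by simp [hP]), if_neg (by simp [hP])]
        exact ih h'

-- a list of positive seconds has nonnegative sum, zero only when empty
theorem pvSum_poslist (l : List (Int × Int)) (h : ∀ q ∈ l, 0 < q.2) :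
    0 ≤ (l.map (fun q => q.2)).sum ∧ ((l.map (fun q => q.2)).sum = 0 → l = []) := by
  induction l with
  | nil => simp
  | cons q l ih =>
      have h' : ∀ q ∈ l, 0 < q.2 := fun q hq => h q (List.mem_cons_of_mem _ hq)
      have hq : 0 < q.2 := h q List.mem_cons_self
      obtain ⟨ih1, _⟩ := ih h'
      simp only [List.map_cons, List.sum_cons]
      constructor
      · omega
      · intro h0; omega

-- splitting a sum by the prune condition
theorem pvSum_split (n v : Int) (l : List (Int × Int)) :
    ((l.filter (fun q => decide (q.1 + n - 1 ≤ v))).map (fun q => q.2)).sum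
      + ((l.filter (fun q => decide (v < q.1 + n - 1))).map (fun q => q.2)).sum
      = (l.map (fun q => q.2)).sum := by
  induction l with
  | nil => simp
  | cons q l ih =>
      rw [List.filter_cons, List.filter_cons]
      by_cases hd : q.1 + n - 1 ≤ v
      · rw [if_pos (by simpa using hd), if_neg (by simp; omega)]
        simp only [List.map_cons, List.sum_cons]
        omega
      · rw [if_neg (by simpa using hd), if_pos (by simp; omega)]
        simp only [List.map_cons, List.sum_cons]
        omega

-- when no open group survives, window sums above p vanish
theorem pvWsum_zero_of_dead (n : Int) (rec : List (Int × Int)) (p w : Int)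
    (hle : ∀ q ∈ rec, q.1 ≤ p) (hnn : ∀ q ∈ rec, 0 ≤ q.2)
    (hzero : ∀ q ∈ rec, ¬((0 < q.2) ∧ (p < q.1 + n - 1))) (hw : p < w) :
    pvWsum n rec w = 0 := by
  apply List.sum_eq_zero
  intro a ha
  obtain ⟨q, hq, hqa⟩ := List.mem_map.mp ha
  have hqrec := List.mem_of_mem_filter hq
  have hcond := (List.mem_filter.mp hq).2
  simp only [Bool.and_eq_true, decide_eq_true_eq] at hcond
  have h1 := hle q hqrec
  have h2 := hnn q hqrec
  have h3 := hzero q hqrec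
  have : q.2 = 0 := by
    by_contra hne
    exact h3 ⟨by omega, by omega⟩
  omega

-- the running total 'opened' is the window sum just above the last processed key
theorem pvWsum_opened (n : Int) (rec : List (Int × Int)) (p : Int)
    (hle : ∀ q ∈ rec, q.1 ≤ p) (hnn : ∀ q ∈ rec, 0 ≤ q.2) :
    pvWsum n rec (p + 1)
      = ((rec.filter (fun q => decide (0 < q.2) && decide (p < q.1 + n - 1))).map (fun q => q.2)).sum := by
  rw [pvSum_filter_pos rec _ hnn]
  unfold pvWsum
  congr 1
  congr 1
  apply List.filter_congr
  intro q hq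
  have := hle q hq
  apply Bool.eq_iff_iff.mpr
  simp only [Bool.and_eq_true, decide_eq_true_eq]
  omega

def pvShadowR (n : Int) (rec : List (Int × Int)) (rest : List Int) (w : Int) : Prop :=
  ∃ x, (x ∈ rest ∨ x ∈ rec.map Prod.fst) ∧ 0 < w - x ∧ w - x < n

theorem bLoop_spec (nums : List Int) (cnt : PySem.Dict Int Int) (n : Int)
    (hn : 2 ≤ n) (hcnt : ∀ v, cnt.getD v 0 = (nums.count v : Int)) :
    ∀ (rest : List Int) (rec : List (Int × Int)) (p : Int) (open_ : List (Int × Int)) (opened : Int),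
      rest.Pairwise (· < ·) →
      (∀ q ∈ rec, q.1 ≤ p) →
      (∀ x ∈ rest, p < x) →
      rec.Pairwise (fun a b => b.1 < a.1) →
      (∀ q ∈ rec, 0 ≤ q.2) →
      (∀ y ∈ nums, y ∈ rest ∨ y ∈ rec.map Prod.fst) →
      open_ = (rec.filter (fun q => decide (0 < q.2) && decide (p < q.1 + n - 1))).reverse →
      opened = (open_.map (fun q => q.2)).sum →
      (bLoop cnt n rest open_ opened (some p) = true ↔
        ∀ w, p < w → pvShadowR n rec rest w → 0 ≤ pvAval nums n (pvRseq nums n rec rest) w) := by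
  intro rest
  induction rest with
  | nil =>
      intro rec p open_ opened _ hle _ _ hnn hcov hop hsum
      have hfiltpos : ∀ q ∈ rec.filter (fun q => decide (0 < q.2) && decide (p < q.1 + n - 1)), 0 < q.2 := by
        intro q hq
        have := (List.mem_filter.mp hq).2
        simp only [Bool.and_eq_true, decide_eq_true_eq] at this
        exact this.1
      have hopsum : opened
          = ((rec.filter (fun q => decide (0 < q.2) && decide (p < q.1 + n - 1))).map (fun q => q.2)).sum := by
        rw [hsum, hop, List.map_reverse, List.sum_reverse]
      have hLHS : bLoop cnt n [] open_ opened (some p) = decide (opened = 0) := rfl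
      rw [hLHS]
      have hFnil : pvRseq nums n rec [] = rec := rfl
      constructor
      · intro h0 w hpw hsh
        have h0' : opened = 0 := by simpa using h0
        have hfe : rec.filter (fun q => decide (0 < q.2) && decide (p < q.1 + n - 1)) = [] :=
          (pvSum_poslist _ hfiltpos).2 (by omega)
        have hzero : ∀ q ∈ rec, ¬((0 < q.2) ∧ (p < q.1 + n - 1)) := by
          intro q hq hc
          have := List.filter_eq_nil_iff.mp hfe q hq
          simp only [Bool.and_eq_true, decide_eq_true_eq] at this
          exact this ⟨hc.1, hc.2⟩
        rw [hFnil]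
        unfold pvAval
        rw [pvWsum_zero_of_dead n rec p w hle hnn hzero hpw]
        have : (0:Int) ≤ (nums.count w : Int) := Int.natCast_nonneg _
        omega
      · intro hR
        simp only [decide_eq_true_eq]
        by_contra hne
        have hge : 0 ≤ opened := by
          rw [hopsum]; exact (pvSum_poslist _ hfiltpos).1
        have hfne : rec.filter (fun q => decide (0 < q.2) && decide (p < q.1 + n - 1)) ≠ [] := by
          intro hfe; rw [hfe] at hopsum; simp at hopsum; exact hne hopsum
        obtain ⟨q, hq⟩ := List.exists_mem_of_ne_nil _ hfne
        have hqrec := List.mem_of_mem_filter hq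
        have hqc := (List.mem_filter.mp hq).2
        simp only [Bool.and_eq_true, decide_eq_true_eq] at hqc
        have hq1 := hle q hqrec
        have hsh : pvShadowR n rec [] (p + 1) :=
          ⟨q.1, Or.inr (List.mem_map.mpr ⟨q, hqrec, rfl⟩), by omega, by omega⟩
        have hval := hR (p + 1) (by omega) hsh
        rw [hFnil] at hval
        have hnotmem : (p + 1) ∉ nums := by
          intro hm
          rcases hcov _ hm with h | h
          · simp at h
          · obtain ⟨q', hq', hq'e⟩ := List.mem_map.mp h
            have := hle q' hq'
            omega
        have hcz : (nums.count (p + 1) : Int) = 0 := by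
          rw [List.count_eq_zero.mpr hnotmem]; rfl
        unfold pvAval at hval
        rw [hcz, pvWsum_opened n rec p hle hnn, ← hopsum] at hval
        omega
  | cons v vs ih =>
      intro rec p open_ opened hsorted hle hgt hdec hnn hcov hop hsum
      have hvp : p < v := hgt v List.mem_cons_self
      have hvvs : ∀ x ∈ vs, v < x := (List.pairwise_cons.mp hsorted).1
      have hsorted' : vs.Pairwise (· < ·) := (List.pairwise_cons.mp hsorted).2
      have hltrec : ∀ q ∈ rec, ∀ x ∈ (v :: vs), q.1 < x := by
        intro q hq x hx
        exact lt_of_le_of_lt (hle q hq) (hgt x hx)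
      have hlt' : ∀ q ∈ ((v, pvAval nums n rec v) :: rec), ∀ u ∈ vs, q.1 < u := by
        intro q hq u hu
        rcases List.mem_cons.mp hq with h | h
        · subst h; exact hvvs u hu
        · exact hltrec q h u (List.mem_cons_of_mem _ hu)
      have hfiltpos : ∀ q ∈ rec.filter (fun q => decide (0 < q.2) && decide (p < q.1 + n - 1)), 0 < q.2 := by
        intro q hq
        have := (List.mem_filter.mp hq).2
        simp only [Bool.and_eq_true, decide_eq_true_eq] at this
        exact this.1
      have hopsum : opened
          = ((rec.filter (fun q => decide (0 < q.2) && decide (p < q.1 + n - 1))).map (fun q => q.2)).sum := by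
        rw [hsum, hop, List.map_reverse, List.sum_reverse]
      have hwp1 : pvWsum n rec (p + 1) = opened := by
        rw [pvWsum_opened n rec p hle hnn, ← hopsum]
      have hFdef : pvRseq nums n rec (v :: vs) = pvRseq nums n ((v, pvAval nums n rec v) :: rec) vs := rfl
      have hFv : pvAval nums n (pvRseq nums n rec (v :: vs)) v = pvAval nums n rec v := by
        rw [hFdef, pvRseq_aval_head nums n vs ((v, pvAval nums n rec v) :: rec) v hsorted' hvvs hlt']
        rw [pvAval_cons, if_neg (by omega)]
        ring
      have hstep : bLoop cnt n (v :: vs) open_ opened (some p)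
          = if (opened ≠ 0) ∧ (∀ p', (some p : Option Int) = some p' → v ≠ p' + 1) then false
            else
              (if cnt.getD v 0 - opened < 0 then false
               else
                 bLoop cnt n vs
                   (bPrune n v
                     (if cnt.getD v 0 - opened ≠ 0 then
                        (open_ ++ [(v, cnt.getD v 0 - opened)], opened + (cnt.getD v 0 - opened))
                      else (open_, opened)).1
                     (if cnt.getD v 0 - opened ≠ 0 then
                        (open_ ++ [(v, cnt.getD v 0 - opened)], opened + (cnt.getD v 0 - opened))
                      else (open_, opened)).2).1
                   (bPrune n v
                     (if cnt.getD v 0 - opened ≠ 0 then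
                        (open_ ++ [(v, cnt.getD v 0 - opened)], opened + (cnt.getD v 0 - opened))
                      else (open_, opened)).1
                     (if cnt.getD v 0 - opened ≠ 0 then
                        (open_ ++ [(v, cnt.getD v 0 - opened)], opened + (cnt.getD v 0 - opened))
                      else (open_, opened)).2).2
                   (some v)) := rfl
      by_cases hgap : opened ≠ 0 ∧ v ≠ p + 1
      · rw [hstep, if_pos ⟨hgap.1, fun p' hp' => by
          have hpp : p = p' := Option.some.inj hp'
          rw [← hpp]; exact hgap.2⟩]
        simp only [Bool.false_eq_true, false_iff]
        intro hR
        obtain ⟨hne, hnev⟩ := hgap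
        have hge : 0 ≤ opened := by
          rw [hopsum]; exact (pvSum_poslist _ hfiltpos).1
        have hfne : rec.filter (fun q => decide (0 < q.2) && decide (p < q.1 + n - 1)) ≠ [] := by
          intro hfe; rw [hfe] at hopsum; simp at hopsum; exact hne hopsum
        obtain ⟨q, hq⟩ := List.exists_mem_of_ne_nil _ hfne
        have hqrec := List.mem_of_mem_filter hq
        have hqc := (List.mem_filter.mp hq).2
        simp only [Bool.and_eq_true, decide_eq_true_eq] at hqc
        have hq1 := hle q hqrec
        have hsh : pvShadowR n rec (v :: vs) (p + 1) :=
          ⟨q.1, Or.inr (List.mem_map.mpr ⟨q, hqrec, rfl⟩), by omega, by omega⟩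
        have hval := hR (p + 1) (by omega) hsh
        have hfilnil : (v :: vs).filter (fun u => decide (0 < (p+1) - u) && decide ((p+1) - u < n)) = [] := by
          rw [List.filter_eq_nil_iff]
          intro u hu
          have : v ≤ u := by
            rcases List.mem_cons.mp hu with h | h
            · omega
            · exact le_of_lt (hvvs u h)
          simp only [Bool.and_eq_true, decide_eq_true_eq]
          omega
        have hwsF := pvRseq_wsum nums n (v :: vs) rec (p + 1) hsorted hltrec
        rw [hfilnil] at hwsF
        simp only [List.map_nil, List.sum_nil, add_zero] at hwsF
        have hnotmem : (p + 1) ∉ nums := by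
          intro hm
          rcases hcov _ hm with h | h
          · rcases List.mem_cons.mp h with h' | h'
            · omega
            · have := hvvs _ h'; omega
          · obtain ⟨q', hq', hq'e⟩ := List.mem_map.mp h
            have := hle q' hq'
            omega
        have hcz : (nums.count (p + 1) : Int) = 0 := by
          rw [List.count_eq_zero.mpr hnotmem]; rfl
        unfold pvAval at hval
        rw [hcz, hwsF, hwp1] at hval
        omega
      · rw [hstep, if_neg (fun hc => hgap ⟨hc.1, hc.2 p rfl⟩)]
        have hng : opened = 0 ∨ v = p + 1 := by tauto
        have hopemp : opened = 0 → ∀ q ∈ rec, ¬((0 < q.2) ∧ (p < q.1 + n - 1)) := by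
          intro h0 q hq hc
          have hfe : rec.filter (fun q => decide (0 < q.2) && decide (p < q.1 + n - 1)) = [] :=
            (pvSum_poslist _ hfiltpos).2 (by omega)
          have := List.filter_eq_nil_iff.mp hfe q hq
          simp only [Bool.and_eq_true, decide_eq_true_eq] at this
          exact this ⟨hc.1, hc.2⟩
        have hov : pvWsum n rec v = opened := by
          rcases hng with h0 | hp1
          · rw [h0]
            exact pvWsum_zero_of_dead n rec p v hle hnn (hopemp h0) hvp
          · rw [hp1]; exact hwp1
        have hrval : cnt.getD v 0 - opened = pvAval nums n rec v := by
          rw [hcnt v]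
          unfold pvAval
          rw [hov]
        by_cases hrneg : cnt.getD v 0 - opened < 0
        · rw [if_pos hrneg]
          simp only [Bool.false_eq_true, false_iff]
          intro hR
          have hcv : (0:Int) ≤ (nums.count v : Int) := Int.natCast_nonneg _
          have hopos : 0 < opened := by rw [hcnt v] at hrneg; omega
          have hvp1 : v = p + 1 := by
            rcases hng with h0 | h1
            · omega
            · exact h1
          have hfne : rec.filter (fun q => decide (0 < q.2) && decide (p < q.1 + n - 1)) ≠ [] := by
            intro hfe; rw [hfe] at hopsum; simp at hopsum; omega
          obtain ⟨q, hq⟩ := List.exists_mem_of_ne_nil _ hfne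
          have hqrec := List.mem_of_mem_filter hq
          have hqc := (List.mem_filter.mp hq).2
          simp only [Bool.and_eq_true, decide_eq_true_eq] at hqc
          have hq1 := hle q hqrec
          have hsh : pvShadowR n rec (v :: vs) v :=
            ⟨q.1, Or.inr (List.mem_map.mpr ⟨q, hqrec, rfl⟩), by omega, by omega⟩
          have hval := hR v hvp hsh
          rw [hFv] at hval
          unfold pvAval at hval
          rw [hov] at hval
          rw [hcnt v] at hrneg
          omega
        · rw [if_neg hrneg]
          rw [hrval]
          have hrnn : 0 ≤ pvAval nums n rec v := by rw [← hrval]; omega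
          -- the state after this iteration
          have hascopen : open_.Pairwise (fun a b => a.1 < b.1) := by
            rw [hop]
            rw [List.pairwise_reverse]
            exact (hdec.filter _).imp (fun h => h)
          have hopenle : ∀ q ∈ open_, q.1 ≤ p := by
            intro q hq
            rw [hop] at hq
            exact hle q (List.mem_of_mem_filter (List.mem_reverse.mp hq))
          have hopenmem : ∀ q ∈ open_, 0 < q.2 ∧ p < q.1 + n - 1 := by
            intro q hq
            rw [hop] at hq
            have := (List.mem_filter.mp (List.mem_reverse.mp hq)).2
            simp only [Bool.and_eq_true, decide_eq_true_eq] at this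
            exact this
          set rv := pvAval nums n rec v with hrvdef
          have hcongr : ∀ q ∈ rec,
              (decide (v < q.1 + n - 1) && (decide (0 < q.2) && decide (p < q.1 + n - 1)))
                = (decide (0 < q.2) && decide (v < q.1 + n - 1)) := by
            intro q hq
            apply Bool.eq_iff_iff.mpr
            simp only [Bool.and_eq_true, decide_eq_true_eq]
            rcases hng with h0 | hp1
            · have := hopemp h0 q hq
              constructor
              · rintro ⟨c, a, b⟩; exact ⟨a, c⟩
              · rintro ⟨a, c⟩; exact absurd ⟨a, by omega⟩ this
            · constructor
              · rintro ⟨c, a, b⟩; exact ⟨a, c⟩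
              · rintro ⟨a, c⟩; exact ⟨c, a, by omega⟩
          have hopenfilter : open_.filter (fun q => decide (v < q.1 + n - 1))
              = (rec.filter (fun q => decide (0 < q.2) && decide (v < q.1 + n - 1))).reverse := by
            rw [hop, List.filter_reverse, List.filter_filter]
            congr 1
            exact List.filter_congr hcongr
          -- split on whether new groups start at v
          rcases eq_or_ne rv 0 with hrz | hrnz
          · have hc1 : ¬ (rv ≠ 0) := by simp [hrz]
            rw [if_neg hc1]
            have hfst := bPrune_fst n v open_ opened hascopen
            have hsnd := bPrune_snd n v open_ opened hascopen
            have hop' : (bPrune n v open_ opened).1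
                = ((((v, rv) :: rec).filter (fun q => decide (0 < q.2) && decide (v < q.1 + n - 1))).reverse) := by
              rw [hfst, hopenfilter]
              congr 1
              rw [List.filter_cons, if_neg (by simp [hrz])]
            have hsum' : (bPrune n v open_ opened).2
                = (((bPrune n v open_ opened).1).map (fun q => q.2)).sum := by
              rw [hfst, hsnd, hsum]
              have := pvSum_split n v open_
              omega
            rw [ih ((v, rv) :: rec) v (bPrune n v open_ opened).1 (bPrune n v open_ opened).2
                hsorted'
                (by intro q hq; rcases List.mem_cons.mp hq with h | h
                    · subst h; rfl
                    · exact le_of_lt (lt_of_le_of_lt (hle q h) hvp))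
                hvvs
                (List.pairwise_cons.mpr ⟨fun q hq => lt_of_le_of_lt (hle q hq) hvp, hdec⟩)
                (by intro q hq; rcases List.mem_cons.mp hq with h | h
                    · subst h; exact hrnn
                    · exact hnn q h)
                (by intro y hy
                    rcases hcov y hy with h | h
                    · rcases List.mem_cons.mp h with h' | h'
                      · subst h'; right; simp
                      · left; exact h'
                    · right; simp only [List.map_cons]; exact List.mem_cons_of_mem _ h)
                hop' hsum']
            · -- transfer of the shadow condition and range
              constructor
              · intro hihR w hpw hsh
                rcases lt_trichotomy w v with hwv | hwv | hwv
                · -- a gap position below v: everything is closed, value 0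
                  have h0 : opened = 0 := by
                    rcases hng with h0 | hp1
                    · exact h0
                    · omega
                  have hfilnil : (v :: vs).filter (fun u => decide (0 < w - u) && decide (w - u < n)) = [] := by
                    rw [List.filter_eq_nil_iff]
                    intro u hu
                    have : v ≤ u := by
                      rcases List.mem_cons.mp hu with h | h
                      · omega
                      · exact le_of_lt (hvvs u h)
                    simp only [Bool.and_eq_true, decide_eq_true_eq]
                    omega
                  have hwsF := pvRseq_wsum nums n (v :: vs) rec w hsorted hltrec
                  rw [hfilnil] at hwsF
                  simp only [List.map_nil, List.sum_nil, add_zero] at hwsF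
                  have hnotmem : w ∉ nums := by
                    intro hm
                    rcases hcov _ hm with h | h
                    · rcases List.mem_cons.mp h with h' | h'
                      · omega
                      · have := hvvs _ h'; omega
                    · obtain ⟨q', hq', hq'e⟩ := List.mem_map.mp h
                      have := hle q' hq'
                      omega
                  have hcz : (nums.count w : Int) = 0 := by
                    rw [List.count_eq_zero.mpr hnotmem]; rfl
                  unfold pvAval
                  rw [hcz, hwsF, pvWsum_zero_of_dead n rec p w hle hnn (hopemp h0) hpw]
                  omega
                · subst hwv
                  rw [hFv]
                  exact hrnn
                · have hsh' : pvShadowR n ((v, rv) :: rec) vs w := by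
                    obtain ⟨x, hx, h1, h2⟩ := hsh
                    refine ⟨x, ?_, h1, h2⟩
                    rcases hx with h | h
                    · rcases List.mem_cons.mp h with h' | h'
                      · right; rw [h']; simp
                      · left; exact h'
                    · right; simp only [List.map_cons]; exact List.mem_cons_of_mem _ h
                  rw [hFdef]
                  exact hihR w hwv hsh'
              · intro hgR w hvw hsh
                have hsh' : pvShadowR n rec (v :: vs) w := by
                  obtain ⟨x, hx, h1, h2⟩ := hsh
                  refine ⟨x, ?_, h1, h2⟩
                  rcases hx with h | h
                  · left; exact List.mem_cons_of_mem _ h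
                  · simp only [List.map_cons] at h
                    rcases List.mem_cons.mp h with h' | h'
                    · left; rw [h']; exact List.mem_cons_self
                    · right; exact h'
                have := hgR w (by omega) hsh'
                rw [hFdef] at this
                exact this
          · rw [if_pos hrnz]
            have hasc1 : (open_ ++ [(v, rv)]).Pairwise (fun a b => a.1 < b.1) := by
              rw [List.pairwise_append]
              refine ⟨hascopen, List.pairwise_singleton _ _, ?_⟩
              intro a ha b hb
              have := hopenle a ha
              simp at hb
              rw [hb]
              omega
            have hfst := bPrune_fst n v (open_ ++ [(v, rv)]) (opened + rv) hasc1
            have hsnd := bPrune_snd n v (open_ ++ [(v, rv)]) (opened + rv) hasc1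
            have hop' : (bPrune n v (open_ ++ [(v, rv)]) (opened + rv)).1
                = ((((v, rv) :: rec).filter (fun q => decide (0 < q.2) && decide (v < q.1 + n - 1))).reverse) := by
              rw [hfst, List.filter_append, hopenfilter]
              have h1 : [(v, rv)].filter (fun q => decide (v < q.1 + n - 1)) = [(v, rv)] := by
                simp [show v < v + n - 1 by omega]
              have h2 : ((v, rv) :: rec).filter (fun q => decide (0 < q.2) && decide (v < q.1 + n - 1))
                  = (v, rv) :: rec.filter (fun q => decide (0 < q.2) && decide (v < q.1 + n - 1)) := by
                rw [List.filter_cons,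
                  if_pos (by simp only [Bool.and_eq_true, decide_eq_true_eq]; constructor <;> omega)]
              rw [h1, h2, List.reverse_cons]
            have hsum' : (bPrune n v (open_ ++ [(v, rv)]) (opened + rv)).2
                = (((bPrune n v (open_ ++ [(v, rv)]) (opened + rv)).1).map (fun q => q.2)).sum := by
              rw [hfst, hsnd]
              have hs1 : opened + rv = ((open_ ++ [(v, rv)]).map (fun q => q.2)).sum := by
                rw [List.map_append, List.sum_append, ← hsum]
                simp
              rw [hs1]
              have := pvSum_split n v (open_ ++ [(v, rv)])
              omega
            rw [ih ((v, rv) :: rec) v (bPrune n v (open_ ++ [(v, rv)]) (opened + rv)).1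
                (bPrune n v (open_ ++ [(v, rv)]) (opened + rv)).2
                hsorted'
                (by intro q hq; rcases List.mem_cons.mp hq with h | h
                    · subst h; rfl
                    · exact le_of_lt (lt_of_le_of_lt (hle q h) hvp))
                hvvs
                (List.pairwise_cons.mpr ⟨fun q hq => lt_of_le_of_lt (hle q hq) hvp, hdec⟩)
                (by intro q hq; rcases List.mem_cons.mp hq with h | h
                    · subst h; exact hrnn
                    · exact hnn q h)
                (by intro y hy
                    rcases hcov y hy with h | h
                    · rcases List.mem_cons.mp h with h' | h'
                      · subst h'; right; simp
                      · left; exact h'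
                    · right; simp only [List.map_cons]; exact List.mem_cons_of_mem _ h)
                hop' hsum']
            · constructor
              · intro hihR w hpw hsh
                rcases lt_trichotomy w v with hwv | hwv | hwv
                · have h0 : opened = 0 := by
                    rcases hng with h0 | hp1
                    · exact h0
                    · omega
                  have hfilnil : (v :: vs).filter (fun u => decide (0 < w - u) && decide (w - u < n)) = [] := by
                    rw [List.filter_eq_nil_iff]
                    intro u hu
                    have : v ≤ u := by
                      rcases List.mem_cons.mp hu with h | h
                      · omega
                      · exact le_of_lt (hvvs u h)
                    simp only [Bool.and_eq_true, decide_eq_true_eq]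
                    omega
                  have hwsF := pvRseq_wsum nums n (v :: vs) rec w hsorted hltrec
                  rw [hfilnil] at hwsF
                  simp only [List.map_nil, List.sum_nil, add_zero] at hwsF
                  have hnotmem : w ∉ nums := by
                    intro hm
                    rcases hcov _ hm with h | h
                    · rcases List.mem_cons.mp h with h' | h'
                      · omega
                      · have := hvvs _ h'; omega
                    · obtain ⟨q', hq', hq'e⟩ := List.mem_map.mp h
                      have := hle q' hq'
                      omega
                  have hcz : (nums.count w : Int) = 0 := by
                    rw [List.count_eq_zero.mpr hnotmem]; rfl
                  unfold pvAval
                  rw [hcz, hwsF, pvWsum_zero_of_dead n rec p w hle hnn (hopemp h0) hpw]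
                  omega
                · subst hwv
                  rw [hFv]
                  exact hrnn
                · have hsh' : pvShadowR n ((v, rv) :: rec) vs w := by
                    obtain ⟨x, hx, h1, h2⟩ := hsh
                    refine ⟨x, ?_, h1, h2⟩
                    rcases hx with h | h
                    · rcases List.mem_cons.mp h with h' | h'
                      · right; rw [h']; simp
                      · left; exact h'
                    · right; simp only [List.map_cons]; exact List.mem_cons_of_mem _ h
                  rw [hFdef]
                  exact hihR w hwv hsh'
              · intro hgR w hvw hsh
                have hsh' : pvShadowR n rec (v :: vs) w := by
                  obtain ⟨x, hx, h1, h2⟩ := hsh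
                  refine ⟨x, ?_, h1, h2⟩
                  rcases hx with h | h
                  · left; exact List.mem_cons_of_mem _ h
                  · simp only [List.map_cons] at h
                    rcases List.mem_cons.mp h with h' | h'
                    · left; rw [h']; exact List.mem_cons_self
                    · right; exact h'
                have := hgR w (by omega) hsh'
                rw [hFdef] at this
                exact this

-- ===== assembly =====

theorem aOuter_true_of_le (n : Int) (hn : n ≤ 1) :
    ∀ (ks : List Int) (d : PySem.Dict Int Int), aOuter n d ks = true := by
  intro ks
  induction ks with
  | nil => intro d; rfl
  | cons x ks ih =>
      intro d
      have hnil : PySem.List.pyRange 1 n 1 = [] := PySem.List.pyRange_one_eq_nil hn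
      have : aOuter n d (x :: ks)
          = match aInner x d (PySem.List.pyRange 1 n 1) with
            | none => false
            | some d' => aOuter n d' ks := rfl
      rw [this, hnil]
      exact ih d

theorem main_eq (nums : List Int) (n : Int) (ks : List Int) (hn : 2 ≤ n)
    (hs : ks.Pairwise (· < ·)) (hcov : ∀ y ∈ nums, y ∈ ks) :
    aOuter n (PySem.Dict.counter nums) ks = bLoop (PySem.Dict.counter nums) n ks [] 0 none := by
  have hcnt : ∀ v, (PySem.Dict.counter nums).getD v 0 = (nums.count v : Int) := by
    intro v; exact PySem.Dict.getD_counter nums v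
  have hdict : ∀ w, (PySem.Dict.counter nums).getD w 0 = pvAval nums n [] w := by
    intro w
    rw [hcnt w]
    simp [pvAval, pvWsum]
  have hA := aOuter_spec nums n ks [] (PySem.Dict.counter nums) hs (by simp) hdict
  cases ks with
  | nil =>
      have hB : bLoop (PySem.Dict.counter nums) n [] [] 0 none = true := by
        simp [bLoop]
      rw [hB]
      exact hA.mpr (by intro w hsh; exact absurd hsh (by simp [pvShadow]))
  | cons v0 vs =>
      have hv0vs : ∀ x ∈ vs, v0 < x := (List.pairwise_cons.mp hs).1
      have hs' : vs.Pairwise (· < ·) := (List.pairwise_cons.mp hs).2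
      have hcnt0 : (0:Int) ≤ (nums.count v0 : Int) := Int.natCast_nonneg _
      -- value recorded at v0
      have hrv0nn : 0 ≤ pvAval nums n [] v0 := by
        unfold pvAval
        rw [pvWsum_nil]
        omega
      have hrv0 : (PySem.Dict.counter nums).getD v0 0 - 0 = pvAval nums n [] v0 := by
        rw [hcnt v0]
        unfold pvAval
        rw [pvWsum_nil]
      have hguard : ¬ (((0:Int) ≠ 0) ∧ (∀ p', (none : Option Int) = some p' → v0 ≠ p' + 1)) := by
        simp
      have hstep0 : bLoop (PySem.Dict.counter nums) n (v0 :: vs) [] 0 none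
          = if (((0:Int) ≠ 0) ∧ (∀ p', (none : Option Int) = some p' → v0 ≠ p' + 1)) then false
            else
              (if (PySem.Dict.counter nums).getD v0 0 - 0 < 0 then false
               else
                 bLoop (PySem.Dict.counter nums) n vs
                   (bPrune n v0
                     (if (PySem.Dict.counter nums).getD v0 0 - 0 ≠ 0 then
                        ([] ++ [(v0, (PySem.Dict.counter nums).getD v0 0 - 0)],
                          0 + ((PySem.Dict.counter nums).getD v0 0 - 0))
                      else (([] : List (Int × Int)), (0:Int))).1
                     (if (PySem.Dict.counter nums).getD v0 0 - 0 ≠ 0 then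
                        ([] ++ [(v0, (PySem.Dict.counter nums).getD v0 0 - 0)],
                          0 + ((PySem.Dict.counter nums).getD v0 0 - 0))
                      else (([] : List (Int × Int)), (0:Int))).2).1
                   (bPrune n v0
                     (if (PySem.Dict.counter nums).getD v0 0 - 0 ≠ 0 then
                        ([] ++ [(v0, (PySem.Dict.counter nums).getD v0 0 - 0)],
                          0 + ((PySem.Dict.counter nums).getD v0 0 - 0))
                      else (([] : List (Int × Int)), (0:Int))).1
                     (if (PySem.Dict.counter nums).getD v0 0 - 0 ≠ 0 then
                        ([] ++ [(v0, (PySem.Dict.counter nums).getD v0 0 - 0)],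
                          0 + ((PySem.Dict.counter nums).getD v0 0 - 0))
                      else (([] : List (Int × Int)), (0:Int))).2).2
                   (some v0)) := rfl
      have hnotneg : ¬ ((PySem.Dict.counter nums).getD v0 0 - 0 < 0) := by
        rw [hrv0]; omega
      -- shared pieces for both sub-cases
      have hle1 : ∀ q ∈ [(v0, pvAval nums n [] v0)], q.1 ≤ v0 := by
        intro q hq; simp only [List.mem_singleton] at hq; rw [hq]
      have hdec1 : ([(v0, pvAval nums n [] v0)] : List (Int × Int)).Pairwise (fun a b => b.1 < a.1) :=
        List.pairwise_singleton _ _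
      have hnn1 : ∀ q ∈ [(v0, pvAval nums n [] v0)], 0 ≤ q.2 := by
        intro q hq; simp only [List.mem_singleton] at hq; rw [hq]; exact hrv0nn
      have hcov1 : ∀ y ∈ nums, y ∈ vs ∨ y ∈ ([(v0, pvAval nums n [] v0)] : List (Int × Int)).map Prod.fst := by
        intro y hy
        rcases List.mem_cons.mp (hcov y hy) with h | h
        · right; simp [h]
        · left; exact h
      have hFdef : pvRseq nums n [] (v0 :: vs) = pvRseq nums n [(v0, pvAval nums n [] v0)] vs := rfl
      have hshadow : ∀ w, pvShadowR n [(v0, pvAval nums n [] v0)] vs w ↔ pvShadow n (v0 :: vs) w := by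
        intro w
        unfold pvShadowR pvShadow
        constructor
        · rintro ⟨x, hx, h1, h2⟩
          refine ⟨x, ?_, h1, h2⟩
          rcases hx with h | h
          · exact List.mem_cons_of_mem _ h
          · simp at h; rw [h]; exact List.mem_cons_self
        · rintro ⟨x, hx, h1, h2⟩
          refine ⟨x, ?_, h1, h2⟩
          rcases List.mem_cons.mp hx with h | h
          · right; simp [h]
          · left; exact h
      have hPP : (∀ w, pvShadow n (v0 :: vs) w → 0 ≤ pvAval nums n (pvRseq nums n [] (v0 :: vs)) w)
          ↔ (∀ w, v0 < w → pvShadowR n [(v0, pvAval nums n [] v0)] vs w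
              → 0 ≤ pvAval nums n (pvRseq nums n [(v0, pvAval nums n [] v0)] vs) w) := by
        constructor
        · intro h w _ hsh
          have := h w ((hshadow w).mp hsh)
          rw [hFdef] at this
          exact this
        · intro h w hsh
          have hv0w : v0 < w := by
            obtain ⟨x, hx, h1, h2⟩ := hsh
            have : v0 ≤ x := by
              rcases List.mem_cons.mp hx with h' | h'
              · omega
              · exact le_of_lt (hv0vs x h')
            omega
          rw [hFdef]
          exact h w hv0w ((hshadow w).mpr hsh)
      rw [hstep0, if_neg hguard, if_neg hnotneg]
      by_cases hc : (PySem.Dict.counter nums).getD v0 0 - 0 ≠ 0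
      · rw [if_pos hc]
        have hpr : bPrune n v0 ([] ++ [(v0, (PySem.Dict.counter nums).getD v0 0 - 0)])
              (0 + ((PySem.Dict.counter nums).getD v0 0 - 0))
            = ([(v0, (PySem.Dict.counter nums).getD v0 0 - 0)],
                0 + ((PySem.Dict.counter nums).getD v0 0 - 0)) := by
          simp only [List.nil_append]
          show (if v0 + n - 1 ≤ v0 then _ else _) = _
          rw [if_neg (by omega)]
        rw [hpr]
        have hne : pvAval nums n [] v0 ≠ 0 := by rw [← hrv0]; exact hc
        have hposrv : 0 < pvAval nums n [] v0 := by omega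
        have hop1 : [(v0, (PySem.Dict.counter nums).getD v0 0 - 0)]
            = (([(v0, pvAval nums n [] v0)] : List (Int × Int)).filter
                (fun q => decide (0 < q.2) && decide (v0 < q.1 + n - 1))).reverse := by
          rw [List.filter_cons,
            if_pos (by simp only [Bool.and_eq_true, decide_eq_true_eq]
                       exact ⟨hposrv, by show v0 < v0 + n - 1; omega⟩)]
          simp only [List.filter_nil, List.reverse_cons, List.reverse_nil, List.nil_append]
          rw [hrv0]
        have hsum1 : 0 + ((PySem.Dict.counter nums).getD v0 0 - 0)
            = (([(v0, (PySem.Dict.counter nums).getD v0 0 - 0)] : List (Int × Int)).map (fun q => q.2)).sum := by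
          simp
        have hB := bLoop_spec nums (PySem.Dict.counter nums) n hn hcnt vs
          [(v0, pvAval nums n [] v0)] v0
          [(v0, (PySem.Dict.counter nums).getD v0 0 - 0)]
          (0 + ((PySem.Dict.counter nums).getD v0 0 - 0))
          hs' hle1 hv0vs hdec1 hnn1 hcov1 hop1 hsum1
        apply Bool.eq_iff_iff.mpr
        rw [hA, hB]
        exact hPP
      · rw [if_neg hc]
        have hpr : bPrune n v0 ([] : List (Int × Int)) (0:Int) = (([] : List (Int × Int)), (0:Int)) := rfl
        rw [hpr]
        have hop1 : ([] : List (Int × Int))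
            = (([(v0, pvAval nums n [] v0)] : List (Int × Int)).filter
                (fun q => decide (0 < q.2) && decide (v0 < q.1 + n - 1))).reverse := by
          rw [List.filter_cons,
            if_neg (by simp only [Bool.and_eq_true, decide_eq_true_eq]
                       rintro ⟨h1, _⟩
                       have h1' : 0 < pvAval nums n [] v0 := h1
                       rw [← hrv0] at h1'
                       omega)]
          simp
        have hsum1 : (0:Int) = (([] : List (Int × Int)).map (fun q => q.2)).sum := by simp
        have hB := bLoop_spec nums (PySem.Dict.counter nums) n hn hcnt vs
          [(v0, pvAval nums n [] v0)] v0 [] 0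
          hs' hle1 hv0vs hdec1 hnn1 hcov1 hop1 hsum1
        apply Bool.eq_iff_iff.mpr
        rw [hA, hB]
        exact hPP
theorem check_break_list_eq (nums : List Int) (n : Int) :
    check_break_list nums n = check_break_list_alt nums n := by
  by_cases hn : n ≤ 1
  · have hA : check_break_list nums n = true := aOuter_true_of_le n hn _ _
    have hB : check_break_list_alt nums n = true := by
      unfold check_break_list_alt
      rw [if_pos hn]
    rw [hA, hB]
  · have hn2 : 2 ≤ n := by omega
    have hkeys : (PySem.Dict.counter nums : PySem.Dict Int Int).keys = PySem.Set.ofList nums :=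
      PySem.Dict.keys_counter nums
    have hs : (PySem.List.sorted (PySem.Dict.counter nums : PySem.Dict Int Int).keys (fun x => x) false).Pairwise (· < ·) := by
      rw [hkeys]
      exact PySem.List.sorted_ofList_pairwise_lt nums
    have hcov : ∀ y ∈ nums, y ∈ PySem.List.sorted (PySem.Dict.counter nums : PySem.Dict Int Int).keys (fun x => x) false := by
      intro y hy
      rw [PySem.List.mem_sorted, hkeys, PySem.Set.mem_ofList]
      exact hy
    have := main_eq nums n _ hn2 hs hcov
    unfold check_break_list check_break_list_alt
    rw [if_neg hn]
    exact this

-- ===== VERDICT (by name: the statement is the Claim_ definition above) =====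
theorem check_break_list_spec : Claim_equal_check_break_list := by
  intro nums n _
  unfold Spec_check_break_list
  exact check_break_list_eq nums n
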